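-- pv_equiv track=rewrite | github.com/kennydoit/fin-trade-extract | fin-trade-craft-files/data_pipeline/common/symbol_id_calculator.py | calculate_symbol_id
-- ===== SOURCE A (Python) =====
-- def calculate_symbol_id(symbol: str) -> int:
--     """
--     Calculate a deterministic symbol ID that maintains alphabetical ordering.
--
--     Uses base-27 calculation with A=1, B=2, ..., Z=26 to ensure:
--     - Deterministic: Same symbol always produces same ID
--     - Alphabetical: IDs sort in alphabetical order
--     - Unique: No collisions for valid stock symbols
--     - Stable: Won't change between runs
--
--     Args:
--         symbol (str): Stock symbol (e.g., 'AAPL', 'MSFT', 'A', 'AA')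
--
--     Returns:
--         int: Calculated symbol ID (base offset 1,000,000)
--
--     Examples:
--         >>> calculate_symbol_id('A')
--         15348907
--         >>> calculate_symbol_id('AA')
--         15880348
--         >>> calculate_symbol_id('AAPL')
--         15882139
--         >>> calculate_symbol_id('MSFT')
--         22620702
--     """
--     # Clean symbol: remove non-alphabetic characters and convert to uppercase
--     clean_symbol = ''.join(c for c in symbol.upper() if c.isalpha())
--
--     # Base offset to ensure positive IDs and avoid conflicts
--     base_offset = 1_000_000
--     symbol_id = 0
--
--     # Calculate base-27 value using fixed 6-character field positioning
--     # Pad symbol to 6 characters for consistent positioning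
--     padded_symbol = clean_symbol[:6].ljust(6, ' ')
--
--     for i, char in enumerate(padded_symbol):
--         char_value = 0 if char == ' ' else ord(char) - ord('A') + 1
--
--         # Position weight: leftmost char has highest weight (27^5), rightmost has 27^0
--         position = 6 - 1 - i
--         symbol_id += char_value * (27 ** position)
--
--     return base_offset + symbol_id
-- ===== SOURCE B (Python) =====
-- def calculate_symbol_id(symbol: str) -> int:
--     # Horner evaluation of the base-27 value; right-padding becomes one final shift.
--     s = ''.join(c for c in symbol.upper() if c.isalpha())[:6]
--     acc = 0
--     for c in s:
--         acc = acc * 27 + (ord(c) - ord('A') + 1)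
--     return 1_000_000 + acc * 27 ** (6 - len(s))
-- ===== Notes on version B (the rewrite author's own statement) =====
-- stated objective: simpler
-- what changed: Replaces A's space-padding to 6 chars and per-position 27**(5-i) weighted sum with a Horner multiply-accumulate over the truncated cleaned symbol plus one final 27**(6-len) shift.
import Mathlib
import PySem

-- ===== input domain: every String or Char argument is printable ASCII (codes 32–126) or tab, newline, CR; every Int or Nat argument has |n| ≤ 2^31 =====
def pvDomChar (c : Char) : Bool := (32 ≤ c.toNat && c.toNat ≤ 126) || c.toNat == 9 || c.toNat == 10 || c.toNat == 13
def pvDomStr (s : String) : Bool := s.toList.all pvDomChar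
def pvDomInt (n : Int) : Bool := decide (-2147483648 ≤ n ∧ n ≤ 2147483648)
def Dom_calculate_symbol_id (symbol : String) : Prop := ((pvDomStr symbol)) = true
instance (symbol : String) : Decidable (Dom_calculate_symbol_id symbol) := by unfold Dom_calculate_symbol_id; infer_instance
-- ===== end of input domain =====

-- B evaluates the base-27 value with Horner's method and one final shift for the
-- right-padding, instead of A's explicit space-padding and per-position 27^position weights
-- (objective: simpler; same cost).


-- ===== PORT A =====
-- char_value = 0 if char == ' ' else ord(char) - ord('A') + 1
def pvCharValA (c : Char) : Int := if c = ' ' then 0 else (c.toNat : Int) - 65 + 1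

def calculate_symbol_id (symbol : String) : Int :=
  -- clean_symbol = ''.join(c for c in symbol.upper() if c.isalpha())
  let clean_symbol := (PySem.Chars.upper symbol.toList).filter PySem.Chars.isalpha
  -- padded_symbol = clean_symbol[:6].ljust(6, ' ')   ([:6] with a nonnegative bound is take 6;
  -- ljust appends spaces up to length 6 — both exact here)
  let padded_symbol := clean_symbol.take 6 ++ List.replicate (6 - (clean_symbol.take 6).length) ' '
  -- for i, char in enumerate(padded_symbol): symbol_id += char_value * 27 ** (6 - 1 - i)
  -- (i ranges over 0..5, so the Int index is taken via toNat — exact)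
  let symbol_id := (PySem.List.enumerate padded_symbol 0).foldl
      (fun acc p => acc + pvCharValA p.2 * 27 ^ (6 - 1 - p.1.toNat)) 0
  1000000 + symbol_id

-- ===== PORT B =====
def calculate_symbol_id_alt (symbol : String) : Int :=
  -- s = ''.join(c for c in symbol.upper() if c.isalpha())[:6]
  let s := ((PySem.Chars.upper symbol.toList).filter PySem.Chars.isalpha).take 6
  -- Horner: acc = acc * 27 + (ord(c) - ord('A') + 1)
  let acc := s.foldl (fun a c => a * 27 + ((c.toNat : Int) - 65 + 1)) 0
  -- final shift for the missing right-padding (len(s) ≤ 6, so the Nat subtraction is exact)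
  1000000 + acc * 27 ^ (6 - s.length)

-- ===== PRECONDITION & SPEC =====
def Spec_calculate_symbol_id (symbol : String) (out : Int) : Prop := out = calculate_symbol_id_alt symbol
instance (symbol : String) (out : Int) : Decidable (Spec_calculate_symbol_id symbol out) := by unfold Spec_calculate_symbol_id; infer_instance

-- ===== CLAIM (what is proved, stated in full; the proofs are below) =====
def Claim_equal_calculate_symbol_id : Prop := ∀ (symbol : String), Dom_calculate_symbol_id symbol → Spec_calculate_symbol_id symbol (calculate_symbol_id symbol)

-- ===== LEMMAS AND PROOFS =====

-- generic Horner fold with a per-character value function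
def pvH (v : Char → Int) (xs : List Char) (a : Int) : Int :=
  xs.foldl (fun a c => a * 27 + v c) a

lemma pvH_shift (v : Char → Int) (xs : List Char) (a : Int) :
    pvH v xs a = a * 27 ^ xs.length + pvH v xs 0 := by
  induction xs generalizing a with
  | nil => simp [pvH]
  | cons c rest ih =>
    have h1 : pvH v (c :: rest) a = pvH v rest (a * 27 + v c) := rfl
    have h2 : pvH v (c :: rest) 0 = pvH v rest (0 * 27 + v c) := rfl
    rw [h1, h2, ih, ih (0 * 27 + v c), List.length_cons]
    ring

-- A's enumerate loop equals the Horner value when the indices end at 6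
lemma pvLoopA_eq (xs : List Char) (i : Nat) (acc : Int) (h : i + xs.length = 6) :
    (PySem.List.enumerate xs (i : Int)).foldl
        (fun acc p => acc + pvCharValA p.2 * 27 ^ (6 - 1 - p.1.toNat)) acc
      = acc + pvH pvCharValA xs 0 := by
  induction xs generalizing i acc with
  | nil => simp [pvH]
  | cons c rest ih =>
    rw [PySem.List.enumerate_cons, List.foldl_cons]
    have hi : ((i : Int) + 1) = ((i + 1 : Nat) : Int) := by push_cast; ring
    simp only [List.length_cons] at h
    rw [hi, ih (i + 1) _ (by omega)]
    have h2 : pvH pvCharValA (c :: rest) 0 = pvH pvCharValA rest (0 * 27 + pvCharValA c) := rfl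
    rw [h2, pvH_shift pvCharValA rest (0 * 27 + pvCharValA c), Int.toNat_natCast,
        show 6 - 1 - i = rest.length from by omega]
    dsimp only
    ring

lemma pvLoopA_eq0 (xs : List Char) (h : xs.length = 6) :
    (PySem.List.enumerate xs 0).foldl
        (fun acc p => acc + pvCharValA p.2 * 27 ^ (6 - 1 - p.1.toNat)) 0
      = pvH pvCharValA xs 0 := by
  simpa using pvLoopA_eq xs 0 0 (by omega)

lemma pvH_replicate_space (k : Nat) :
    pvH pvCharValA (List.replicate k ' ') 0 = 0 := by
  induction k with
  | zero => simp [pvH]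
  | succ n ih => simpa [pvH, List.replicate_succ, pvCharValA] using ih

-- ===== VERDICT (by name: the statement is the Claim_ definition above) =====
theorem calculate_symbol_id_spec : Claim_equal_calculate_symbol_id := by
  intro symbol _
  unfold Spec_calculate_symbol_id calculate_symbol_id calculate_symbol_id_alt
  set clean := (PySem.Chars.upper symbol.toList).filter PySem.Chars.isalpha with hclean
  set t := clean.take 6 with ht
  have hlen : t.length ≤ 6 := by simp [ht]
  have hpadlen : (t ++ List.replicate (6 - t.length) ' ').length = 6 := by
    simp [List.length_append, List.length_replicate]; omega
  dsimp only
  -- A's loop = Horner over the padded list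
  rw [pvLoopA_eq0 _ hpadlen]
  -- split the padding off
  have hsplit : pvH pvCharValA (t ++ List.replicate (6 - t.length) ' ') 0
      = pvH pvCharValA t 0 * 27 ^ (6 - t.length) := by
    rw [pvH, List.foldl_append,
        show (List.replicate (6 - t.length) ' ').foldl (fun a c => a * 27 + pvCharValA c)
            (t.foldl (fun a c => a * 27 + pvCharValA c) 0)
          = pvH pvCharValA (List.replicate (6 - t.length) ' ') (pvH pvCharValA t 0) from rfl,
        pvH_shift, pvH_replicate_space]
    simp [List.length_replicate]
  -- on the cleaned characters the two value functions agree (no spaces survive isalpha)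
  have hval : pvH pvCharValA t 0 = t.foldl (fun a c => a * 27 + ((c.toNat : Int) - 65 + 1)) 0 := by
    apply PySem.List.foldl_congr_mem
    intro a c hc
    have halpha : PySem.Chars.isalpha c = true :=
      (List.mem_filter.mp (List.mem_of_mem_take (ht ▸ hc))).2
    have hne : c ≠ ' ' := by
      intro h; rw [h] at halpha; exact absurd halpha (by decide)
    simp [pvCharValA, hne]
  rw [hsplit, hval]
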